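-- pv_equiv track=rewrite | github.com/A5jadAli/mit-winter-contest | adv_round/number_reduction.py | can_reach_one
-- ===== SOURCE A (Python) =====
-- def get_digits(n):
--     """Get list of digits in number n."""
--     return [int(d) for d in str(n)]
--
-- def can_reach_one(n, memo=None):
--     """Check if number n can reach 1 using the given operations."""
--     if memo is None:
--         memo = {}
--
--     if n in memo:
--         return memo[n]
--
--     if n == 1:
--         return True
--
--     digits = [d for d in get_digits(n) if d > 1]
--
--     for digit in digits:
--         if n % digit == 0:
--             new_n = n // digit
--             if can_reach_one(new_n, memo):
--                 memo[n] = True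
--                 return True
--
--     memo[n] = False
--     return False
-- ===== SOURCE B (Python) =====
-- def get_digits(n):
--     """Get list of digits in number n."""
--     return [int(d) for d in str(n)]
--
-- def can_reach_one(n, memo=None):
--     """Check if number n can reach 1 using the given operations.
--
--     Pure re-implementation: the caller's memo is only consulted (read-only,
--     never mutated); divisor digits are tried via any() over the digit set.
--     """
--     if memo is not None and n in memo:
--         return memo[n]
--     if n == 1:
--         return True
--     return any(n % d == 0 and can_reach_one(n // d, memo)
--                for d in set(get_digits(n)) if d > 1)
-- ===== Notes on version B (the rewrite author's own statement) =====
-- stated objective: simpler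
-- what changed: Replaces A's mutating memo-table DFS (dict threaded and written through an explicit digit loop with early returns) by a short pure recursion that only reads the caller's memo and tests the divisor digits with any() over the digit set; B never mutates the caller's memo.
import Mathlib
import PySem

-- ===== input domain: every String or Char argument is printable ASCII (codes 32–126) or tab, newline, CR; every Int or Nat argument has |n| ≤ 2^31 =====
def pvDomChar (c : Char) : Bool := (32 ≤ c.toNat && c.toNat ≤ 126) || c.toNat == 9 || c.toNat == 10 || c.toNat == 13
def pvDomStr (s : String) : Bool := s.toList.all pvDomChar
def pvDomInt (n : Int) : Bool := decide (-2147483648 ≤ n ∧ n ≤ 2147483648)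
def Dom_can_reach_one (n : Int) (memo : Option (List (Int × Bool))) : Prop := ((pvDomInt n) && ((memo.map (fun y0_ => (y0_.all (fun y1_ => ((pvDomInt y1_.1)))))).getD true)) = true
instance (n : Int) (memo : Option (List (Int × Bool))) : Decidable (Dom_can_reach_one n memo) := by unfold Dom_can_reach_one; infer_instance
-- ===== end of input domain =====

-- B replaces A's mutating memo-table DFS by a pure recursion that only reads the caller's memo;
-- return-value equivalence only: Python A writes results into the caller's memo dict, B never mutates it.

-- ===== PORT A =====
-- get_digits(n): [int(d) for d in str(n)]; int(d) raises on '-' (negative n) — those inputs are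
-- outside Pre_; filterMap is exact wherever Python returns.
def pvGetDigits (x : Int) : List Int :=
  (PySem.Int.toChars x).filterMap (fun c => PySem.Int.ofChars? [c])

-- A's recursion, fuel-guarded (fuel = |n|+1 always suffices, see the proofs); the Bool×Dict pair
-- threads the mutated memo exactly as Python does.
mutual
def pvGoA : Nat → Int → PySem.Dict Int Bool → Bool × PySem.Dict Int Bool
  | 0, _, m => (false, m)   -- fuel guard only, never reached
  | f+1, x, m =>
    match m.get? x with
    | some b => (b, m)
    | none =>
      if x = 1 then (true, m)
      else pvLoopA f ((pvGetDigits x).filter (fun d => 1 < d)) x m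
  termination_by f _ _ => (f, 0)
  decreasing_by all_goals (simp_wf; omega)
def pvLoopA : Nat → List Int → Int → PySem.Dict Int Bool → Bool × PySem.Dict Int Bool
  | _, [], x, m => (false, m.insert x false)
  | f, d :: ds, x, m =>
    if PySem.Int.mod x d = 0 then
      match pvGoA f (PySem.Int.floordiv x d) m with
      | (true, m') => (true, m'.insert x true)
      | (false, m') => pvLoopA f ds x m'
    else pvLoopA f ds x m
  termination_by f ds _ _ => (f, ds.length + 1)
  decreasing_by all_goals (simp_wf; omega)
end

def can_reach_one (n : Int) (memo : Option (List (Int × Bool))) : Bool :=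
  (pvGoA (n.natAbs + 1) n (PySem.Dict.mk (memo.getD []))).1

-- ===== PORT B =====
-- Source B's pure recursion: memo consulted read-only, any() over the digit set (fuel-guarded as above).
def pvGoB : Nat → Int → PySem.Dict Int Bool → Bool
  | 0, _, _ => false   -- fuel guard only, never reached
  | f+1, x, m =>
    match m.get? x with
    | some b => b
    | none =>
      if x = 1 then true
      else ((PySem.Set.ofList (pvGetDigits x)).filter (fun d => 1 < d)).any
             (fun d => (PySem.Int.mod x d == 0) && pvGoB f (PySem.Int.floordiv x d) m)

def can_reach_one_alt (n : Int) (memo : Option (List (Int × Bool))) : Bool :=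
  pvGoB (n.natAbs + 1) n (PySem.Dict.mk (memo.getD []))

-- ===== PRECONDITION & SPEC =====
-- Pre_ excludes exactly the inputs on which Python A raises ValueError: n < 0 whose digits are
-- taken (int('-') fails), i.e. negative n that is not a key of the given memo.
def Pre_can_reach_one (n : Int) (memo : Option (List (Int × Bool))) : Prop :=
  0 ≤ n ∨ (PySem.Dict.mk (memo.getD [])).get? n ≠ none
instance (n : Int) (memo : Option (List (Int × Bool))) : Decidable (Pre_can_reach_one n memo) := by
  unfold Pre_can_reach_one; infer_instance
def pvWitness_can_reach_one : Int × (Option (List (Int × Bool))) := (10, some [(3, true)])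

def Spec_can_reach_one (n : Int) (memo : Option (List (Int × Bool))) (out : Bool) : Prop := out = can_reach_one_alt n memo
instance (n : Int) (memo : Option (List (Int × Bool))) (out : Bool) : Decidable (Spec_can_reach_one n memo out) := by unfold Spec_can_reach_one; infer_instance

-- ===== CLAIM (what is proved, stated in full; the proofs are below) =====
def Claim_equal_can_reach_one : Prop := ∀ (n : Int) (memo : Option (List (Int × Bool))), Dom_can_reach_one n memo → Pre_can_reach_one n memo → Spec_can_reach_one n memo (can_reach_one n memo)

-- ===== LEMMAS AND PROOFS =====

-- the pure value B computes for a state x against a fixed memo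
def pvB (x : Int) (base : PySem.Dict Int Bool) : Bool := pvGoB (x.natAbs + 1) x base

-- invariant relating A's evolving memo to the initial one: initial entries are preserved, and
-- every entry is either initial or the pure value of its key
def pvExt (base m : PySem.Dict Int Bool) : Prop :=
  (∀ k b, base.get? k = some b → m.get? k = some b) ∧
  (∀ k b, m.get? k = some b → base.get? k = some b ∨ pvB k base = b)

lemma pv_shrink {x d : Int} (hx : 2 ≤ x.natAbs) (hd : 1 < d)
    (hm : PySem.Int.mod x d = 0) : (PySem.Int.floordiv x d).natAbs < x.natAbs := by
  have hdvd : d ∣ x := (PySem.Int.mod_eq_zero_iff_dvd x d).1 hm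
  rw [PySem.Int.floordiv_eq_ediv_of_pos (by omega)]
  have hmul : x / d * d = x := Int.ediv_mul_cancel hdvd
  have h1 : (x / d).natAbs * d.natAbs = x.natAbs := by
    rw [← Int.natAbs_mul, hmul]
  have hd2 : 2 ≤ d.natAbs := by omega
  nlinarith [h1, hd2, hx]

lemma pv_mem_filter_gt {d : Int} {l : List Int}
    (h : d ∈ l.filter (fun d => 1 < d)) : 1 < d := by
  have := (List.mem_filter.1 h).2
  simpa using this

lemma pv_small_filter {x : Int} (hx1 : x ≠ 1) (hsmall : x.natAbs < 2) :
    (pvGetDigits x).filter (fun d => 1 < d) = [] := by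
  have : x = 0 ∨ x = -1 := by omega
  rcases this with h | h <;> subst h <;> decide

lemma pv_any_congr_mem {α : Type} {l : List α} {p q : α → Bool}
    (h : ∀ a ∈ l, p a = q a) : l.any p = l.any q := by
  rw [Bool.eq_iff_iff, List.any_eq_true, List.any_eq_true]
  constructor
  · rintro ⟨a, ha, hp⟩; exact ⟨a, ha, h a ha ▸ hp⟩
  · rintro ⟨a, ha, hq⟩; exact ⟨a, ha, (h a ha).symm ▸ hq⟩

lemma pv_any_set_filter (l : List Int) (p : Int → Bool) (q : Int → Bool) :
    (((PySem.Set.ofList l).filter p).any q) = ((l.filter p).any q) := by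
  rw [Bool.eq_iff_iff]
  simp [List.any_eq_true, PySem.Set.mem_ofList]

-- with enough fuel, pvGoB does not depend on the fuel
lemma pvGoB_fuel_aux : ∀ (a : Nat) (x : Int), x.natAbs ≤ a → ∀ (f : Nat) (m : PySem.Dict Int Bool),
    x.natAbs < f → pvGoB f x m = pvB x m := by
  intro a
  induction a using Nat.strong_induction_on with
  | _ a IH =>
    intro x hxa f m hf
    obtain ⟨f', rfl⟩ : ∃ f', f = f' + 1 := ⟨f - 1, by omega⟩
    show pvGoB (f' + 1) x m = pvGoB (x.natAbs + 1) x m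
    simp only [pvGoB]
    cases hget : m.get? x with
    | some b => rfl
    | none =>
      by_cases hx1 : x = 1
      · simp [hx1]
      · simp only [hx1, if_false]
        rw [pv_any_set_filter, pv_any_set_filter]
        by_cases hsmall : x.natAbs < 2
        · rw [pv_small_filter hx1 hsmall]; rfl
        · apply pv_any_congr_mem
          intro d hd
          have hd1 : 1 < d := pv_mem_filter_gt hd
          by_cases hm0 : PySem.Int.mod x d = 0
          · have hlt : (PySem.Int.floordiv x d).natAbs < x.natAbs :=
              pv_shrink (by omega) hd1 hm0
            rw [IH (PySem.Int.floordiv x d).natAbs (by omega) _ le_rfl f' m (by omega),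
                IH (PySem.Int.floordiv x d).natAbs (by omega) _ le_rfl x.natAbs m (by omega)]
          · have hb : (PySem.Int.mod x d == 0) = false := by simpa using hm0
            rw [hb]; rfl

lemma pvGoB_fuel (x : Int) (f : Nat) (m : PySem.Dict Int Bool) (h : x.natAbs < f) :
    pvGoB f x m = pvB x m :=
  pvGoB_fuel_aux x.natAbs x le_rfl f m h

-- the recursion equation satisfied by pvB (A's digit list replaces B's digit set)
lemma pvB_unfold (x : Int) (base : PySem.Dict Int Bool) :
    pvB x base =
      match base.get? x with
      | some b => b
      | none =>
        if x = 1 then true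
        else ((pvGetDigits x).filter (fun d => 1 < d)).any
               (fun d => (PySem.Int.mod x d == 0) && pvB (PySem.Int.floordiv x d) base) := by
  show pvGoB (x.natAbs + 1) x base = _
  simp only [pvGoB]
  cases hget : base.get? x with
  | some b => rfl
  | none =>
    by_cases hx1 : x = 1
    · simp [hx1]
    · simp only [hx1, if_false]
      rw [pv_any_set_filter]
      by_cases hsmall : x.natAbs < 2
      · rw [pv_small_filter hx1 hsmall]; rfl
      · apply pv_any_congr_mem
        intro d hd
        have hd1 : 1 < d := pv_mem_filter_gt hd
        by_cases hm0 : PySem.Int.mod x d = 0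
        · rw [pvGoB_fuel _ _ _ (pv_shrink (by omega) hd1 hm0)]
        · have hb : (PySem.Int.mod x d == 0) = false := by simpa using hm0
          rw [hb]; rfl

-- pvExt is preserved by recording the pure value of a fresh key
lemma pvExt_insert {base m : PySem.Dict Int Bool} {x : Int} {v : Bool}
    (hext : pvExt base m) (hbase : base.get? x = none) (hval : pvB x base = v) :
    pvExt base (m.insert x v) := by
  constructor
  · intro k b hk
    by_cases hkx : k = x
    · rw [hkx, hbase] at hk; cases hk
    · rw [PySem.Dict.get?_insert_of_ne _ _ hkx]
      exact hext.1 k b hk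
  · intro k b hk
    by_cases hkx : k = x
    · subst hkx
      rw [PySem.Dict.get?_insert_self] at hk
      injection hk with h
      right; rw [hval, h]
    · rw [PySem.Dict.get?_insert_of_ne _ _ hkx] at hk
      exact hext.2 k b hk

-- A's recursion computes pvB against the initial memo and keeps the invariant
lemma pvGoA_spec : ∀ (f : Nat) (x : Int) (base m : PySem.Dict Int Bool),
    x.natAbs < f → pvExt base m →
    (pvGoA f x m).1 = pvB x base ∧ pvExt base (pvGoA f x m).2 := by
  intro f
  induction f with
  | zero => intro x base m h; omega
  | succ f IH =>
    intro x base m hf hext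
    simp only [pvGoA]
    cases hget : m.get? x with
    | some b =>
      refine ⟨?_, hext⟩
      rcases hext.2 x b hget with hb | hb
      · rw [pvB_unfold, hb]
      · exact hb.symm
    | none =>
      have hbase : base.get? x = none := by
        cases hb : base.get? x with
        | none => rfl
        | some b => rw [hext.1 x b hb] at hget; cases hget
      by_cases hx1 : x = 1
      · subst hx1
        simp only [if_true]
        refine ⟨?_, hext⟩
        rw [pvB_unfold, hbase]
        simp
      · simp only [hx1, if_false]
        have hEq0 : pvB x base =
            ((pvGetDigits x).filter (fun d => 1 < d)).any
              (fun d => (PySem.Int.mod x d == 0) && pvB (PySem.Int.floordiv x d) base) := by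
          rw [pvB_unfold, hbase]; simp [hx1]
        have hflist : ∀ d ∈ (pvGetDigits x).filter (fun d => 1 < d),
            PySem.Int.mod x d = 0 → (PySem.Int.floordiv x d).natAbs < f := by
          intro d hd hm0
          by_cases hsmall : x.natAbs < 2
          · rw [pv_small_filter hx1 hsmall] at hd; cases hd
          · have := pv_shrink (by omega) (pv_mem_filter_gt hd) hm0; omega
        -- inner induction over the digit list
        suffices H : ∀ (ds : List Int) (m' : PySem.Dict Int Bool), pvExt base m' →
            (∀ d ∈ ds, PySem.Int.mod x d = 0 → (PySem.Int.floordiv x d).natAbs < f) →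
            pvB x base = ds.any (fun d => (PySem.Int.mod x d == 0) && pvB (PySem.Int.floordiv x d) base) →
            (pvLoopA f ds x m').1 = pvB x base ∧ pvExt base (pvLoopA f ds x m').2 by
          exact H _ m hext hflist hEq0
        intro ds
        induction ds with
        | nil =>
          intro m' hext' _ hEq
          simp only [List.any_nil] at hEq
          simp only [pvLoopA]
          exact ⟨hEq.symm, pvExt_insert hext' hbase hEq⟩
        | cons d ds IHds =>
          intro m' hext' hfl hEq
          simp only [pvLoopA]
          simp only [List.any_cons] at hEq
          by_cases hm0 : PySem.Int.mod x d = 0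
          · simp only [hm0, if_pos]
            have hrec := IH (PySem.Int.floordiv x d) base m'
              (hfl d (List.mem_cons_self) hm0) hext'
            rcases hgo : pvGoA f (PySem.Int.floordiv x d) m' with ⟨r, m''⟩
            rw [hgo] at hrec
            cases r with
            | true =>
              refine ⟨?_, ?_⟩
              · rw [hEq]
                simp [hm0, ← hrec.1]
              · apply pvExt_insert hrec.2 hbase
                rw [hEq]; simp [hm0, ← hrec.1]
            | false =>
              apply IHds m'' hrec.2 (fun d' hd' => hfl d' (List.mem_cons_of_mem _ hd'))
              rw [hEq]
              simp [hm0, ← hrec.1]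
          · rw [if_neg hm0]
            apply IHds m' hext' (fun d' hd' => hfl d' (List.mem_cons_of_mem _ hd'))
            rw [hEq]
            have : (PySem.Int.mod x d == 0) = false := by simp [hm0]
            simp [this]

-- ===== VERDICT (by name: the statement is the Claim_ definition above) =====
theorem can_reach_one_spec : Claim_equal_can_reach_one := by
  intro n memo _ _
  unfold Spec_can_reach_one can_reach_one can_reach_one_alt
  have hext : pvExt (PySem.Dict.mk (memo.getD [])) (PySem.Dict.mk (memo.getD [])) :=
    ⟨fun k b h => h, fun k b h => Or.inl h⟩
  have h := pvGoA_spec (n.natAbs + 1) n _ _ (by omega) hext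
  rw [h.1]
  exact (pvGoB_fuel n (n.natAbs + 1) _ (by omega)).symm
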